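-- pv_equiv track=rewrite | github.com/ferdos202150762/TempleOfHorror | env-experiments/v2_simplified_game_3p_9cards/inference.py | compute_hand_from_labels
-- ===== SOURCE A (Python) =====
-- def compute_hand_from_labels(hand):
--     """Computes a sorted string representation of a player's hand."""
--     type_map = {
--         "gold": "Gold",
--         "fire": "Fire",
--         "empty": "Empty"
--     }
--     result = [type_map[item.split('_')[0].lower()] for item in hand if item.split('_')[0].lower() in type_map]
--     priority = {"Gold": 0, "Fire": 1, "Empty": 2}
--     result.sort(key=lambda x: priority[x])
--     return "".join(result)
-- ===== SOURCE B (Python) =====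
-- def compute_hand_from_labels(hand):
--     """Computes a sorted string representation of a player's hand."""
--     gold = fire = empty = 0
--     for item in hand:
--         prefix = item.split('_')[0].lower()
--         if prefix == "gold":
--             gold += 1
--         elif prefix == "fire":
--             fire += 1
--         elif prefix == "empty":
--             empty += 1
--     return "Gold" * gold + "Fire" * fire + "Empty" * empty
-- ===== Notes on version B (the rewrite author's own statement) =====
-- stated objective: simpler
-- what changed: B replaces A's build-a-label-list + sort-by-priority-dict + join with a single counting pass (three integer counters keyed by the lowercased prefix) and emits "Gold"*g + "Fire"*f + "Empty"*e directly in the fixed priority order, eliminating the sort and both dicts.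
import Mathlib
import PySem

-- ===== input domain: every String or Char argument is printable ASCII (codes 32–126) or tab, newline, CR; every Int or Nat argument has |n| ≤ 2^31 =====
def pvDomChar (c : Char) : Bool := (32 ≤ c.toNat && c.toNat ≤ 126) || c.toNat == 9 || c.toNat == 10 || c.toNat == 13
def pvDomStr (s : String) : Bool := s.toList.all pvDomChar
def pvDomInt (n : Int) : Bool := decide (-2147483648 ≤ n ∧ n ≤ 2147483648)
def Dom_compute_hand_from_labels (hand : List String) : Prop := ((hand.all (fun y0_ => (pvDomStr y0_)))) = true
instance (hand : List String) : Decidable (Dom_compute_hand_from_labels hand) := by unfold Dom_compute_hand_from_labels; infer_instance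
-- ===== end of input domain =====

-- B replaces A's label-list + sort-by-priority with one counting pass over the hand and a
-- direct emission "Gold"*g + "Fire"*f + "Empty"*e in the fixed priority order (simpler, no sort).

-- ===== PORT A =====
-- item.split('_')[0]: '_' ≠ "" so split? is some and the result is nonempty, so [0] is headD.
-- The comprehension's "if … in type_map" filter + lookup is exactly filterMap of Dict.get?.
-- priority[x] never misses (every produced label is a key), ported as getD with an unused default.
def compute_hand_from_labels (hand : List String) : String :=
  let type_map : PySem.Dict String String :=
    ((PySem.Dict.empty.insert "gold" "Gold").insert "fire" "Fire").insert "empty" "Empty"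
  let result : List String := hand.filterMap (fun item =>
    type_map.get? (PySem.Str.lower (((PySem.Str.split? item "_").getD []).headD "")))
  let priority : PySem.Dict String Int :=
    ((PySem.Dict.empty.insert "Gold" 0).insert "Fire" 1).insert "Empty" 2
  PySem.Str.join "" (PySem.List.sorted result (fun x => priority.getD x (0 : Int)))

-- ===== PORT B =====
-- "s * n" for a nonnegative count n (the counters only ever grow from 0), exact here.
def pvRepeat (s : String) (n : Nat) : String := PySem.Str.join "" (List.replicate n s)

-- The final "+"-concatenation of the three pieces is ported as join "" of the three pieces (exact).
def compute_hand_from_labels_alt (hand : List String) : String :=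
  let c := hand.foldl (fun (c : Nat × Nat × Nat) item =>
    let pfx := PySem.Str.lower (((PySem.Str.split? item "_").getD []).headD "")
    if pfx = "gold" then (c.1 + 1, c.2.1, c.2.2)
    else if pfx = "fire" then (c.1, c.2.1 + 1, c.2.2)
    else if pfx = "empty" then (c.1, c.2.1, c.2.2 + 1)
    else c) (0, 0, 0)
  PySem.Str.join "" [pvRepeat "Gold" c.1, pvRepeat "Fire" c.2.1, pvRepeat "Empty" c.2.2]

-- ===== PRECONDITION & SPEC =====
def Spec_compute_hand_from_labels (hand : List String) (out : String) : Prop := out = compute_hand_from_labels_alt hand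
instance (hand : List String) (out : String) : Decidable (Spec_compute_hand_from_labels hand out) := by unfold Spec_compute_hand_from_labels; infer_instance

-- ===== CLAIM (what is proved, stated in full; the proofs are below) =====
def Claim_equal_compute_hand_from_labels : Prop := ∀ (hand : List String), Dom_compute_hand_from_labels hand → Spec_compute_hand_from_labels hand (compute_hand_from_labels hand)

-- ===== LEMMAS AND PROOFS =====

-- abbreviations for the proof (not used by the ports)
def pvTypeMap : PySem.Dict String String :=
  ((PySem.Dict.empty.insert "gold" "Gold").insert "fire" "Fire").insert "empty" "Empty"

def pvPrio : String → Int :=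
  fun x => (((PySem.Dict.empty.insert "Gold" (0 : Int)).insert "Fire" 1).insert "Empty" 2).getD x (0 : Int)

def pvBefore : String → String → Bool := fun a b => decide (pvPrio a < pvPrio b)

def pvRepList (g f e : Nat) : List String :=
  List.replicate g "Gold" ++ (List.replicate f "Fire" ++ List.replicate e "Empty")

def pvStep (c : Nat × Nat × Nat) (item : String) : Nat × Nat × Nat :=
  let pfx := PySem.Str.lower (((PySem.Str.split? item "_").getD []).headD "")
  if pfx = "gold" then (c.1 + 1, c.2.1, c.2.2)
  else if pfx = "fire" then (c.1, c.2.1 + 1, c.2.2)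
  else if pfx = "empty" then (c.1, c.2.1, c.2.2 + 1)
  else c

theorem ins_skip (b : String → String → Bool) (x y : String) (ys : List String)
    (h : b x y = false) :
    PySem.List.insertBy b x (y :: ys) = y :: PySem.List.insertBy b x ys := by
  simp [PySem.List.insertBy, h]

theorem ins_hit (b : String → String → Bool) (x y : String) (ys : List String)
    (h : b x y = true) :
    PySem.List.insertBy b x (y :: ys) = x :: y :: ys := by
  simp [PySem.List.insertBy, h]

theorem ins_skip_rep (b : String → String → Bool) (x y : String) (n : Nat) (rest : List String)
    (h : b x y = false) :
    PySem.List.insertBy b x (List.replicate n y ++ rest)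
      = List.replicate n y ++ PySem.List.insertBy b x rest := by
  induction n with
  | zero => simp
  | succ n ih => simp [List.replicate_succ, ins_skip _ _ _ _ h, ih]

theorem rep_shift (n : Nat) (a : String) (l : List String) :
    List.replicate n a ++ a :: l = a :: (List.replicate n a ++ l) := by
  induction n with
  | zero => rfl
  | succ n ih => simp [List.replicate_succ, ih]

theorem ins_rep_same (e : Nat) :
    PySem.List.insertBy pvBefore "Empty" (List.replicate e "Empty")
      = List.replicate (e + 1) "Empty" := by
  induction e with
  | zero => rfl
  | succ e ih =>
    rw [List.replicate_succ, ins_skip pvBefore "Empty" "Empty" _ (by decide), ih,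
      List.replicate_succ (n := e + 1)]

theorem ins_gold (g f e : Nat) :
    PySem.List.insertBy pvBefore "Gold" (pvRepList g f e) = pvRepList (g + 1) f e := by
  unfold pvRepList
  rw [ins_skip_rep pvBefore "Gold" "Gold" g _ (by decide)]
  cases f with
  | zero =>
    cases e with
    | zero => simp [PySem.List.insertBy, List.replicate_succ']
    | succ e =>
      simp only [List.replicate, List.nil_append,
        ins_hit pvBefore "Gold" "Empty" _ (by decide)]
      rw [rep_shift]
      rfl
  | succ f =>
    simp only [List.replicate, List.cons_append,
      ins_hit pvBefore "Gold" "Fire" _ (by decide)]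
    rw [rep_shift]

theorem ins_fire (g f e : Nat) :
    PySem.List.insertBy pvBefore "Fire" (pvRepList g f e) = pvRepList g (f + 1) e := by
  unfold pvRepList
  rw [ins_skip_rep pvBefore "Fire" "Gold" g _ (by decide),
      ins_skip_rep pvBefore "Fire" "Fire" f _ (by decide)]
  cases e with
  | zero => simp [PySem.List.insertBy, List.replicate_succ']
  | succ e =>
    simp only [List.replicate, ins_hit pvBefore "Fire" "Empty" _ (by decide)]
    rw [rep_shift]
    rfl

theorem ins_empty (g f e : Nat) :
    PySem.List.insertBy pvBefore "Empty" (pvRepList g f e) = pvRepList g f (e + 1) := by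
  unfold pvRepList
  rw [ins_skip_rep pvBefore "Empty" "Gold" g _ (by decide),
      ins_skip_rep pvBefore "Empty" "Fire" f _ (by decide), ins_rep_same]

theorem typeMap_get (p : String) :
    pvTypeMap.get? p =
      if p = "gold" then some "Gold"
      else if p = "fire" then some "Fire"
      else if p = "empty" then some "Empty"
      else none := by
  have hm : pvTypeMap = PySem.Dict.mk [("gold", "Gold"), ("fire", "Fire"), ("empty", "Empty")] := by
    decide
  rw [hm]
  by_cases h1 : p = "gold"
  · subst h1; decide
  by_cases h2 : p = "fire"
  · subst h2; decide
  by_cases h3 : p = "empty"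
  · subst h3; decide
  have g1 : ¬("gold" = p) := fun h => h1 h.symm
  have g2 : ¬("fire" = p) := fun h => h2 h.symm
  have g3 : ¬("empty" = p) := fun h => h3 h.symm
  simp only [PySem.Dict.get?_mk_cons, beq_iff_eq, if_neg g1, if_neg g2, if_neg g3,
    if_neg h1, if_neg h2, if_neg h3]
  simp [PySem.Dict.get?]

theorem main_fold (hand : List String) : ∀ (g f e : Nat),
    List.foldl (fun acc x => PySem.List.insertBy pvBefore x acc) (pvRepList g f e)
      (hand.filterMap (fun item => pvTypeMap.get? (PySem.Str.lower (((PySem.Str.split? item "_").getD []).headD ""))))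
    = pvRepList (hand.foldl pvStep (g, f, e)).1 (hand.foldl pvStep (g, f, e)).2.1
        (hand.foldl pvStep (g, f, e)).2.2 := by
  induction hand with
  | nil => intro g f e; rfl
  | cons x t ih =>
    intro g f e
    rw [List.foldl_cons]
    by_cases h1 : PySem.Str.lower (((PySem.Str.split? x "_").getD []).headD "") = "gold"
    · have hl : (x :: t).filterMap
          (fun item => pvTypeMap.get? (PySem.Str.lower (((PySem.Str.split? item "_").getD []).headD "")))
          = "Gold" :: t.filterMap
          (fun item => pvTypeMap.get? (PySem.Str.lower (((PySem.Str.split? item "_").getD []).headD ""))) := by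
        rw [List.filterMap_cons, typeMap_get, if_pos h1]
      have hs : pvStep (g, f, e) x = (g + 1, f, e) := by
        simp only [pvStep]; rw [if_pos h1]
      rw [hs, hl, List.foldl_cons, ins_gold]
      exact ih (g + 1) f e
    by_cases h2 : PySem.Str.lower (((PySem.Str.split? x "_").getD []).headD "") = "fire"
    · have hl : (x :: t).filterMap
          (fun item => pvTypeMap.get? (PySem.Str.lower (((PySem.Str.split? item "_").getD []).headD "")))
          = "Fire" :: t.filterMap
          (fun item => pvTypeMap.get? (PySem.Str.lower (((PySem.Str.split? item "_").getD []).headD ""))) := by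
        rw [List.filterMap_cons, typeMap_get, if_neg h1, if_pos h2]
      have hs : pvStep (g, f, e) x = (g, f + 1, e) := by
        simp only [pvStep]; rw [if_neg h1, if_pos h2]
      rw [hs, hl, List.foldl_cons, ins_fire]
      exact ih g (f + 1) e
    by_cases h3 : PySem.Str.lower (((PySem.Str.split? x "_").getD []).headD "") = "empty"
    · have hl : (x :: t).filterMap
          (fun item => pvTypeMap.get? (PySem.Str.lower (((PySem.Str.split? item "_").getD []).headD "")))
          = "Empty" :: t.filterMap
          (fun item => pvTypeMap.get? (PySem.Str.lower (((PySem.Str.split? item "_").getD []).headD ""))) := by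
        rw [List.filterMap_cons, typeMap_get, if_neg h1, if_neg h2, if_pos h3]
      have hs : pvStep (g, f, e) x = (g, f, e + 1) := by
        simp only [pvStep]; rw [if_neg h1, if_neg h2, if_pos h3]
      rw [hs, hl, List.foldl_cons, ins_empty]
      exact ih g f (e + 1)
    · have hl : (x :: t).filterMap
          (fun item => pvTypeMap.get? (PySem.Str.lower (((PySem.Str.split? item "_").getD []).headD "")))
          = t.filterMap
          (fun item => pvTypeMap.get? (PySem.Str.lower (((PySem.Str.split? item "_").getD []).headD ""))) := by
        rw [List.filterMap_cons, typeMap_get, if_neg h1, if_neg h2, if_neg h3]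
      have hs : pvStep (g, f, e) x = (g, f, e) := by
        simp only [pvStep]; rw [if_neg h1, if_neg h2, if_neg h3]
      rw [hs, hl]
      exact ih g f e

theorem flatten_intersperse_nil {α : Type} (xss : List (List α)) :
    (List.intersperse ([] : List α) xss).flatten = xss.flatten := by
  induction xss with
  | nil => rfl
  | cons h t ih => cases t <;> simp_all [List.intersperse]

theorem charsjoin_nil (xss : List (List Char)) : PySem.Chars.join [] xss = xss.flatten := by
  simp [PySem.Chars.join, List.intercalate, flatten_intersperse_nil]

theorem join_split (g f e : Nat) :
    PySem.Str.join "" (pvRepList g f e)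
      = PySem.Str.join "" [pvRepeat "Gold" g, pvRepeat "Fire" f, pvRepeat "Empty" e] := by
  simp [PySem.Str.join, pvRepeat, pvRepList, charsjoin_nil]

theorem compute_hand_from_labels_eq_alt (hand : List String) :
    compute_hand_from_labels hand = compute_hand_from_labels_alt hand := by
  calc compute_hand_from_labels hand
      = PySem.Str.join ""
          (List.foldl (fun acc x => PySem.List.insertBy pvBefore x acc) (pvRepList 0 0 0)
            (hand.filterMap (fun item =>
              pvTypeMap.get? (PySem.Str.lower (((PySem.Str.split? item "_").getD []).headD ""))))) := by
        rw [compute_hand_from_labels, PySem.List.sorted_eq_foldl_insertBy]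
        rfl
    _ = PySem.Str.join "" (pvRepList (hand.foldl pvStep (0, 0, 0)).1
          (hand.foldl pvStep (0, 0, 0)).2.1 (hand.foldl pvStep (0, 0, 0)).2.2) := by
        rw [main_fold]
    _ = PySem.Str.join "" [pvRepeat "Gold" (hand.foldl pvStep (0, 0, 0)).1,
          pvRepeat "Fire" (hand.foldl pvStep (0, 0, 0)).2.1,
          pvRepeat "Empty" (hand.foldl pvStep (0, 0, 0)).2.2] := join_split _ _ _
    _ = compute_hand_from_labels_alt hand := rfl

-- ===== VERDICT (by name: the statement is the Claim_ definition above) =====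
theorem compute_hand_from_labels_spec : Claim_equal_compute_hand_from_labels := by
  intro hand _
  exact compute_hand_from_labels_eq_alt hand
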